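-- pv_equiv track=rewrite | github.com/soitun/inferx | dashboard/app.py | infer_model_status
-- ===== SOURCE A (Python) =====
-- MODEL_STATUS_READY = {"code": "ready", "label": "Ready"}
--
-- MODEL_STATUS_RESUMING = {"code": "resuming", "label": "Resuming..."}
--
-- MODEL_STATUS_STANDBY = {"code": "standby", "label": "Standby"}
--
-- MODEL_STATUS_RESTORING = {"code": "restoring", "label": "Restoring"}
--
-- MODEL_STATUS_PENDING = {"code": "pending", "label": "Pending"}
--
-- MODEL_STATUS_SNAPSHOTTING = {"code": "snapshotting", "label": "Creating Snapshot..."}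
--
-- MODEL_STATUS_FAILED = {"code": "failed", "label": "Failed"}
--
-- RESTORE_ACTIVE_POD_STATES = {
--     "Init",
--     "PullingImage",
--     "Creating",
--     "Created",
--     "Loading",
--     "LoadingTimeout",
--     "Restoring",
-- }
--
-- SNAPSHOT_ACTIVE_POD_STATES = {
--     "Init",
--     "PullingImage",
--     "Creating",
--     "Created",
--     "Loading",
--     "Snapshoting",
-- }
--
-- def infer_model_status(pods, func_status_state, fails=None):
--     pod_list = pods if isinstance(pods, list) else []
--     fail_list = fails if isinstance(fails, list) else []
--
--     def pod_state(pod):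
--         return str((((pod or {}).get("object") or {}).get("status") or {}).get("state") or "").strip()
--
--     def pod_create_type(pod):
--         return str((((pod or {}).get("object") or {}).get("spec") or {}).get("create_type") or "").strip()
--
--     if str(func_status_state or "").strip() == "Fail":
--         return MODEL_STATUS_FAILED
--
--     # Some failed revisions no longer have pods by the time the dashboard loads.
--     # Current-version fail logs are the remaining durable signal in that case.
--     if len(pod_list) == 0 and len(fail_list) > 0:
--         return MODEL_STATUS_FAILED
--
--     if any(pod_state(pod) == "Ready" for pod in pod_list):
--         return MODEL_STATUS_READY
--
--     if any(pod_state(pod) in {"Resuming", "ResumeDone"} for pod in pod_list):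
--         return MODEL_STATUS_RESUMING
--
--     if any(pod_state(pod) in {"Standby", "MemHibernated"} for pod in pod_list):
--         return MODEL_STATUS_STANDBY
--
--     if any(
--         pod_create_type(pod) == "Restore" and pod_state(pod) in RESTORE_ACTIVE_POD_STATES
--         for pod in pod_list
--     ):
--         return MODEL_STATUS_RESTORING
--
--     if any(
--         pod_create_type(pod) == "Snapshot" and pod_state(pod) in SNAPSHOT_ACTIVE_POD_STATES
--         for pod in pod_list
--     ):
--         return MODEL_STATUS_SNAPSHOTTING
--
--     # `Normal` pods do not currently have a dedicated user-facing mapping. Keep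
--     # the fallback conservative for early/unmapped states outside the explicit
--     # restore and snapshot transitions above.
--     return MODEL_STATUS_PENDING
-- ===== SOURCE B (Python) =====
-- MODEL_STATUS_READY = {"code": "ready", "label": "Ready"}
-- MODEL_STATUS_RESUMING = {"code": "resuming", "label": "Resuming..."}
-- MODEL_STATUS_STANDBY = {"code": "standby", "label": "Standby"}
-- MODEL_STATUS_RESTORING = {"code": "restoring", "label": "Restoring"}
-- MODEL_STATUS_PENDING = {"code": "pending", "label": "Pending"}
-- MODEL_STATUS_SNAPSHOTTING = {"code": "snapshotting", "label": "Creating Snapshot..."}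
-- MODEL_STATUS_FAILED = {"code": "failed", "label": "Failed"}
--
-- RESTORE_ACTIVE_POD_STATES = {
--     "Init", "PullingImage", "Creating", "Created", "Loading",
--     "LoadingTimeout", "Restoring",
-- }
--
-- SNAPSHOT_ACTIVE_POD_STATES = {
--     "Init", "PullingImage", "Creating", "Created", "Loading", "Snapshoting",
-- }
--
--
-- def infer_model_status(pods, func_status_state, fails=None):
--     pod_list = pods if isinstance(pods, list) else []
--     fail_list = fails if isinstance(fails, list) else []
--
--     if str(func_status_state or "").strip() == "Fail":
--         return MODEL_STATUS_FAILED
--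
--     # Failed revisions may have no pods left; fail logs are the durable signal.
--     if len(pod_list) == 0 and len(fail_list) > 0:
--         return MODEL_STATUS_FAILED
--
--     # Single pass: compute each pod's state/create_type once, accumulate flags.
--     has_ready = has_resuming = has_standby = has_restoring = has_snapshotting = False
--     for pod in pod_list:
--         obj = (pod or {}).get("object") or {}
--         state = str((obj.get("status") or {}).get("state") or "").strip()
--         create_type = str((obj.get("spec") or {}).get("create_type") or "").strip()
--         has_ready = has_ready or state == "Ready"
--         has_resuming = has_resuming or state in ("Resuming", "ResumeDone")
--         has_standby = has_standby or state in ("Standby", "MemHibernated")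
--         has_restoring = has_restoring or (
--             create_type == "Restore" and state in RESTORE_ACTIVE_POD_STATES)
--         has_snapshotting = has_snapshotting or (
--             create_type == "Snapshot" and state in SNAPSHOT_ACTIVE_POD_STATES)
--
--     # Resolve by a single ordered priority table.
--     for flag, status in (
--         (has_ready, MODEL_STATUS_READY),
--         (has_resuming, MODEL_STATUS_RESUMING),
--         (has_standby, MODEL_STATUS_STANDBY),
--         (has_restoring, MODEL_STATUS_RESTORING),
--         (has_snapshotting, MODEL_STATUS_SNAPSHOTTING),
--     ):
--         if flag:
--             return status
--     return MODEL_STATUS_PENDING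
-- ===== Notes on version B (the rewrite author's own statement) =====
-- stated objective: alternative
-- what changed: Replaced A's five separate any(...) scans (each recomputing pod_state/pod_create_type) with a single pass over pod_list that computes each pod's state and create_type once and accumulates five presence flags, then resolves the status via one ordered priority table; the two early guards are kept.
import Mathlib
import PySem

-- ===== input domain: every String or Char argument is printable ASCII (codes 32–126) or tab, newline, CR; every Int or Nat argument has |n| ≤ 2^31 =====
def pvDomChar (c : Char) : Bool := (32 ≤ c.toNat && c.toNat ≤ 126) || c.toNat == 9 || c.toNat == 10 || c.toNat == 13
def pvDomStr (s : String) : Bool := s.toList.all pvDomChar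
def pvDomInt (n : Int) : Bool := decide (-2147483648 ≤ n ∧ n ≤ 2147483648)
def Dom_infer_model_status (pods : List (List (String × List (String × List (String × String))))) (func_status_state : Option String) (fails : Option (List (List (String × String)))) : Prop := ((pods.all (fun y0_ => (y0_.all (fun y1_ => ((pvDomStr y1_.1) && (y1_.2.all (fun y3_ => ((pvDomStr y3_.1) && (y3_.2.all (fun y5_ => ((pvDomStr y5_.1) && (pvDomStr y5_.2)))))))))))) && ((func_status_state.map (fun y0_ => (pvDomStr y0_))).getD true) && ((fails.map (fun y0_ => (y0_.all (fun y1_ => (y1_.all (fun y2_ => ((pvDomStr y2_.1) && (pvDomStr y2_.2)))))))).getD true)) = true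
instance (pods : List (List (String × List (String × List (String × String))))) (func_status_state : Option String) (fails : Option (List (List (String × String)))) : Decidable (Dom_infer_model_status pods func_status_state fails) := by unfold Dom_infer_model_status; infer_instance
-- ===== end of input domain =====

-- ===== PORT A =====
-- B replaces A's five any(...) scans with one flag-gathering pass plus a priority table (alternative decomposition).

-- first-match association-list lookup = Python dict.get (dicts ported as assoc lists)
def pvGetA {V : Type} (d : List (String × V)) (k : String) : Option V :=
  (d.find? (fun p => p.1 == k)).map (·.2)

-- pod_state(pod): str((((pod or {}).get("object") or {}).get("status") or {}).get("state") or "").strip()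
def pvPodState (pod : List (String × List (String × List (String × String)))) : String :=
  PySem.Str.strip ((pvGetA ((pvGetA ((pvGetA pod "object").getD []) "status").getD []) "state").getD "")

def pvPodCreateType (pod : List (String × List (String × List (String × String)))) : String :=
  PySem.Str.strip ((pvGetA ((pvGetA ((pvGetA pod "object").getD []) "spec").getD []) "create_type").getD "")

def pvFAILED : List (String × String) := [("code", "failed"), ("label", "Failed")]
def pvREADY : List (String × String) := [("code", "ready"), ("label", "Ready")]
def pvRESUMING : List (String × String) := [("code", "resuming"), ("label", "Resuming...")]
def pvSTANDBY : List (String × String) := [("code", "standby"), ("label", "Standby")]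
def pvRESTORING : List (String × String) := [("code", "restoring"), ("label", "Restoring")]
def pvSNAPSHOTTING : List (String × String) := [("code", "snapshotting"), ("label", "Creating Snapshot...")]
def pvPENDING : List (String × String) := [("code", "pending"), ("label", "Pending")]

def pvRestoreActive : List String :=
  ["Init", "PullingImage", "Creating", "Created", "Loading", "LoadingTimeout", "Restoring"]
def pvSnapshotActive : List String :=
  ["Init", "PullingImage", "Creating", "Created", "Loading", "Snapshoting"]

def infer_model_status (pods : List (List (String × List (String × List (String × String))))) (func_status_state : Option String) (fails : Option (List (List (String × String)))) : List (String × String) :=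
  let pod_list := pods                         -- isinstance(pods, list) is True on this domain
  let fail_list := fails.getD []               -- isinstance(fails, list): None -> []
  if PySem.Str.strip (func_status_state.getD "") == "Fail" then pvFAILED
  else if pod_list.length == 0 && decide (fail_list.length > 0) then pvFAILED
  else if pod_list.any (fun pod => pvPodState pod == "Ready") then pvREADY
  else if pod_list.any (fun pod => ["Resuming", "ResumeDone"].contains (pvPodState pod)) then pvRESUMING
  else if pod_list.any (fun pod => ["Standby", "MemHibernated"].contains (pvPodState pod)) then pvSTANDBY
  else if pod_list.any (fun pod => pvPodCreateType pod == "Restore" && pvRestoreActive.contains (pvPodState pod)) then pvRESTORING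
  else if pod_list.any (fun pod => pvPodCreateType pod == "Snapshot" && pvSnapshotActive.contains (pvPodState pod)) then pvSNAPSHOTTING
  else pvPENDING

-- ===== PORT B =====
-- one pass: per-pod state/create_type computed once, five presence flags accumulated
def pvFlags (pod_list : List (List (String × List (String × List (String × String))))) : Bool × Bool × Bool × Bool × Bool :=
  pod_list.foldl (fun f pod =>
    let obj := (pvGetA pod "object").getD []
    let state := PySem.Str.strip ((pvGetA ((pvGetA obj "status").getD []) "state").getD "")
    let create_type := PySem.Str.strip ((pvGetA ((pvGetA obj "spec").getD []) "create_type").getD "")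
    (f.1 || state == "Ready",
     f.2.1 || ["Resuming", "ResumeDone"].contains state,
     f.2.2.1 || ["Standby", "MemHibernated"].contains state,
     f.2.2.2.1 || (create_type == "Restore" && pvRestoreActive.contains state),
     f.2.2.2.2 || (create_type == "Snapshot" && pvSnapshotActive.contains state)))
    (false, false, false, false, false)

-- ordered priority table: first set flag wins
def pvPick : List (Bool × List (String × String)) → List (String × String)
  | [] => pvPENDING
  | (flag, status) :: rest => if flag then status else pvPick rest

def infer_model_status_alt (pods : List (List (String × List (String × List (String × String))))) (func_status_state : Option String) (fails : Option (List (List (String × String)))) : List (String × String) :=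
  let pod_list := pods
  let fail_list := fails.getD []
  if PySem.Str.strip (func_status_state.getD "") == "Fail" then pvFAILED
  else if pod_list.length == 0 && decide (fail_list.length > 0) then pvFAILED
  else
    let f := pvFlags pod_list
    pvPick [(f.1, pvREADY), (f.2.1, pvRESUMING), (f.2.2.1, pvSTANDBY),
            (f.2.2.2.1, pvRESTORING), (f.2.2.2.2, pvSNAPSHOTTING)]

-- ===== PRECONDITION & SPEC =====
def Spec_infer_model_status (pods : List (List (String × List (String × List (String × String))))) (func_status_state : Option String) (fails : Option (List (List (String × String)))) (out : List (String × String)) : Prop := out = infer_model_status_alt pods func_status_state fails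
instance (pods : List (List (String × List (String × List (String × String))))) (func_status_state : Option String) (fails : Option (List (List (String × String)))) (out : List (String × String)) : Decidable (Spec_infer_model_status pods func_status_state fails out) := by unfold Spec_infer_model_status; infer_instance

-- ===== CLAIM (what is proved, stated in full; the proofs are below) =====
def Claim_equal_infer_model_status : Prop := ∀ (pods : List (List (String × List (String × List (String × String))))) (func_status_state : Option String) (fails : Option (List (List (String × String)))), Dom_infer_model_status pods func_status_state fails → Spec_infer_model_status pods func_status_state fails (infer_model_status pods func_status_state fails)

-- ===== LEMMAS AND PROOFS =====

-- the fold's five flags are exactly A's five any-scans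
theorem pvFlags_eq (pod_list : List (List (String × List (String × List (String × String))))) :
    pvFlags pod_list =
      (pod_list.any (fun pod => pvPodState pod == "Ready"),
       pod_list.any (fun pod => ["Resuming", "ResumeDone"].contains (pvPodState pod)),
       pod_list.any (fun pod => ["Standby", "MemHibernated"].contains (pvPodState pod)),
       pod_list.any (fun pod => pvPodCreateType pod == "Restore" && pvRestoreActive.contains (pvPodState pod)),
       pod_list.any (fun pod => pvPodCreateType pod == "Snapshot" && pvSnapshotActive.contains (pvPodState pod))) := by
  have step : ∀ (acc : Bool × Bool × Bool × Bool × Bool) (l : List (List (String × List (String × List (String × String))))),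
      l.foldl (fun f pod =>
        let obj := (pvGetA pod "object").getD []
        let state := PySem.Str.strip ((pvGetA ((pvGetA obj "status").getD []) "state").getD "")
        let create_type := PySem.Str.strip ((pvGetA ((pvGetA obj "spec").getD []) "create_type").getD "")
        (f.1 || state == "Ready",
         f.2.1 || ["Resuming", "ResumeDone"].contains state,
         f.2.2.1 || ["Standby", "MemHibernated"].contains state,
         f.2.2.2.1 || (create_type == "Restore" && pvRestoreActive.contains state),
         f.2.2.2.2 || (create_type == "Snapshot" && pvSnapshotActive.contains state))) acc =
      (acc.1 || l.any (fun pod => pvPodState pod == "Ready"),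
       acc.2.1 || l.any (fun pod => ["Resuming", "ResumeDone"].contains (pvPodState pod)),
       acc.2.2.1 || l.any (fun pod => ["Standby", "MemHibernated"].contains (pvPodState pod)),
       acc.2.2.2.1 || l.any (fun pod => pvPodCreateType pod == "Restore" && pvRestoreActive.contains (pvPodState pod)),
       acc.2.2.2.2 || l.any (fun pod => pvPodCreateType pod == "Snapshot" && pvSnapshotActive.contains (pvPodState pod))) := by
    intro acc l
    induction l generalizing acc with
    | nil => simp
    | cons p t ih =>
      simp only [List.foldl_cons, List.any_cons, ih, pvPodState, pvPodCreateType]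
      simp [Bool.or_assoc]
  simpa [pvFlags] using step (false, false, false, false, false) pod_list

-- ===== VERDICT (by name: the statement is the Claim_ definition above) =====
theorem infer_model_status_spec : Claim_equal_infer_model_status := by
  intro pods fss fails _
  show infer_model_status pods fss fails = infer_model_status_alt pods fss fails
  unfold infer_model_status infer_model_status_alt
  simp only [pvFlags_eq, pvPick]
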